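-- pv_equiv track=rewrite | github.com/temirlan1221/PP2_2024_Spring | lectura/week5/generators/3.py | generators
-- ===== SOURCE A (Python) =====
-- def generators(start , stop):
-- 	num = start
-- 	while num <= stop:
-- 		if num % 3 == 0:
-- 			if num % 4 == 0:
-- 				yield num
-- 				num+=1
-- 			else:
-- 				num+=1
-- 		else:
-- 			num+=1
-- ===== SOURCE B (Python) =====
-- def generators(start, stop):
--     # jump straight to the first multiple of 12 at or above start, then stride by 12
--     first = start + (-start) % 12
--     yield from range(first, stop + 1, 12)
-- ===== Notes on version B (the rewrite author's own statement) =====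
-- stated objective: faster
-- what changed: Replaces the one-by-one scan with per-number %3/%4 tests by computing the first multiple of 12 at or above start and striding by 12, visiting only the yielded values.
import Mathlib
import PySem

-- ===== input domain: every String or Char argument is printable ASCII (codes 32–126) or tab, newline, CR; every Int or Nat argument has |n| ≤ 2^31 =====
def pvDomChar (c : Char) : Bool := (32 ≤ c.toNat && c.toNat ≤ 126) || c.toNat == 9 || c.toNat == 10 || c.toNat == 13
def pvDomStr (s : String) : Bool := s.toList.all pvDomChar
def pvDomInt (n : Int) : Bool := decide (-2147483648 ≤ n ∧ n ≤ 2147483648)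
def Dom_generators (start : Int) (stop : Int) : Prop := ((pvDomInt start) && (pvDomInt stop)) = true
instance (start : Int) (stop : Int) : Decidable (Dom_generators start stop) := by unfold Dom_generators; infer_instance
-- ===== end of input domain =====

-- B computes the first multiple of 12 at or above start and strides by 12 instead of scanning every integer with %3/%4 tests; generator output is modelled as the list of yielded values.
-- ===== PORT A =====
-- fuel = number of remaining loop iterations (a totality guard only; it is exact)
def generatorsLoop (fuel : Nat) (num : Int) (stop : Int) : List Int :=
  match fuel with
  | 0 => []
  | fuel + 1 =>
    if num ≤ stop then
      if PySem.Int.mod num 3 = 0 then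
        if PySem.Int.mod num 4 = 0 then
          num :: generatorsLoop fuel (num + 1) stop
        else
          generatorsLoop fuel (num + 1) stop
      else
        generatorsLoop fuel (num + 1) stop
    else []

def generators (start : Int) (stop : Int) : List Int :=
  generatorsLoop (stop + 1 - start).toNat start stop

-- ===== PORT B =====
def generators_alt (start : Int) (stop : Int) : List Int :=
  PySem.List.pyRange (start + PySem.Int.mod (-start) 12) (stop + 1) 12

-- ===== PRECONDITION & SPEC =====
def Spec_generators (start : Int) (stop : Int) (out : List Int) : Prop := out = generators_alt start stop
instance (start : Int) (stop : Int) (out : List Int) : Decidable (Spec_generators start stop out) := by unfold Spec_generators; infer_instance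

-- ===== CLAIM (what is proved, stated in full; the proofs are below) =====
def Claim_equal_generators : Prop := ∀ (start : Int) (stop : Int), Dom_generators start stop → Spec_generators start stop (generators start stop)

-- ===== LEMMAS AND PROOFS =====
theorem pyRange12_nil (a b : Int) (h : b ≤ a) : PySem.List.pyRange a b 12 = [] := by
  rw [PySem.List.pyRange_of_pos a b (by norm_num)]
  simp [show ¬ a < b by omega]

theorem pyRange12_cons (a b : Int) (h : a < b) :
    PySem.List.pyRange a b 12 = a :: PySem.List.pyRange (a + 12) b 12 := by
  rw [PySem.List.pyRange_of_pos a b (by norm_num),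
      PySem.List.pyRange_of_pos (a + 12) b (by norm_num)]
  have hc : ((b - a + 12 - 1) / 12).toNat =
      (if a + 12 < b then ((b - (a + 12) + 12 - 1) / 12).toNat else 0) + 1 := by
    split_ifs with h2 <;> omega
  simp only [if_pos h, hc, List.range_succ_eq_map, List.map_cons, List.map_map]
  congr 1
  · push_cast; ring
  · apply List.map_congr_left
    intro k _
    simp only [Function.comp, Nat.succ_eq_add_one]
    push_cast
    ring

theorem loop_eq (n : Nat) : ∀ (num stop : Int), (stop + 1 - num).toNat = n →
    generatorsLoop n num stop =
      PySem.List.pyRange (num + PySem.Int.mod (-num) 12) (stop + 1) 12 := by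
  induction n with
  | zero =>
    intro num stop hn
    have hgt : ¬ num ≤ stop := by omega
    rw [generatorsLoop]
    have hm : PySem.Int.mod (-num) 12 = (-num) % 12 :=
      PySem.Int.mod_eq_emod_of_pos (by norm_num)
    refine (pyRange12_nil _ _ ?_).symm
    have := Int.emod_nonneg (-num) (by norm_num : (12:Int) ≠ 0)
    omega
  | succ n ih =>
    intro num stop hn
    have hle : num ≤ stop := by omega
    have h3 : PySem.Int.mod num 3 = num % 3 :=
      PySem.Int.mod_eq_emod_of_pos (by norm_num)
    have h4 : PySem.Int.mod num 4 = num % 4 :=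
      PySem.Int.mod_eq_emod_of_pos (by norm_num)
    have hm : PySem.Int.mod (-num) 12 = (-num) % 12 :=
      PySem.Int.mod_eq_emod_of_pos (by norm_num)
    have hm1 : PySem.Int.mod (-(num + 1)) 12 = (-(num + 1)) % 12 :=
      PySem.Int.mod_eq_emod_of_pos (by norm_num)
    have ihn := ih (num + 1) stop (by omega)
    rw [generatorsLoop, if_pos hle, h3, h4, hm]

    by_cases h12 : num % 12 = 0
    · have e3 : num % 3 = 0 := by omega
      have e4 : num % 4 = 0 := by omega
      rw [if_pos e3, if_pos e4, ihn, hm1]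
      have hfirst : num + (-num) % 12 = num := by omega
      have hnext : num + 1 + (-(num + 1)) % 12 = num + 12 := by omega
      rw [hfirst, hnext, pyRange12_cons num (stop + 1) (by omega)]
    · have hsame : num + 1 + (-(num + 1)) % 12 = num + (-num) % 12 := by omega
      have hno : ¬ (num % 3 = 0 ∧ num % 4 = 0) := by omega
      rcases Classical.em (num % 3 = 0) with e3 | e3
      · rw [if_pos e3, if_neg (by tauto), ihn, hm1, hsame]
      · rw [if_neg e3, ihn, hm1, hsame]

-- ===== VERDICT (by name: the statement is the Claim_ definition above) =====
theorem generators_spec : Claim_equal_generators := by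
  intro start stop _
  unfold Spec_generators generators generators_alt
  exact loop_eq _ start stop rfl
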